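-- pv_equiv track=rewrite | github.com/kenziebottoms/py-dragon | dragon2.py | generate_plot_points
-- ===== SOURCE A (Python) =====
-- def turn(cardinal,turn_direction):
--   return (cardinal + 4 + turn_direction) % 4
--
-- def get_coords(cardinal,line_length):
--   if cardinal % 2 == 0:
--     return [(cardinal-1)*line_length,0]
--   else:
--     return [0,(cardinal-2)*line_length]
--
-- def generate_plot_points(x_initial,y_initial,turns_list,line_length):
--   plot_points = [[x_initial,y_initial]]
--   x = x_initial
--   y = y_initial
--   cardinal = 0
--   coords = []
--   for item in turns_list:
--     cardinal = turn(cardinal,item)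
--     coords = get_coords(cardinal,line_length)
--     x += coords[0]
--     y += coords[1]
--     plot_points.append([x,y])
--   return plot_points
-- ===== SOURCE B (Python) =====
-- def generate_plot_points(x_initial, y_initial, turns_list, line_length):
--     # B never carries a position: it maintains only a histogram of headings
--     # taken so far and reconstructs each point from the counts, since the net
--     # displacement is line_length * (#east - #west, #north - #south).
--     counts = {}
--     total = 0
--     points = [[x_initial, y_initial]]
--     for t in turns_list:
--         total += t
--         h = total % 4
--         counts[h] = counts.get(h, 0) + 1
--         points.append([x_initial + line_length * (counts.get(2, 0) - counts.get(0, 0)),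
--                        y_initial + line_length * (counts.get(3, 0) - counts.get(1, 0))])
--     return points
-- ===== Notes on version B (the rewrite author's own statement) =====
-- stated objective: alternative
-- what changed: B drops A's carried (x, y, cardinal) state entirely: it maintains a dict histogram counting how many steps were taken in each of the four headings (heading = running turn total mod 4) and reconstructs every plot point from the counts as initial + line_length * (#E - #W, #N - #S).
import Mathlib
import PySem

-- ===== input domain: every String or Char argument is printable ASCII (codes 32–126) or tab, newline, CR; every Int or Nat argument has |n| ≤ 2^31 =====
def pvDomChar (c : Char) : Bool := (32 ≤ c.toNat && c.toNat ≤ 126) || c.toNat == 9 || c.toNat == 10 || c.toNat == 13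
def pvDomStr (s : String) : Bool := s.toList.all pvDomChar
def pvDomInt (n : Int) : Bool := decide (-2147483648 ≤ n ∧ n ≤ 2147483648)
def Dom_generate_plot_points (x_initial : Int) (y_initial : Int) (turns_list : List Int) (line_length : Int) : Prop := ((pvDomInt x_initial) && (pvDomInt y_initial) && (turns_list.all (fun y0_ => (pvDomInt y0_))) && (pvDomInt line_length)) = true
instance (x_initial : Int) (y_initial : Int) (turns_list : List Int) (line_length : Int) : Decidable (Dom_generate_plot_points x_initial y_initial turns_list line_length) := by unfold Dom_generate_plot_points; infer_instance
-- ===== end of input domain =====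

-- B carries no position at all: it maintains only a dict histogram of headings taken so far
-- and reconstructs each point from the counts; objective: alternative.

-- ===== PORT A =====
def pyTurn (cardinal : Int) (turn_direction : Int) : Int :=
  PySem.Int.mod (cardinal + 4 + turn_direction) 4

def pyGetCoords (cardinal : Int) (line_length : Int) : List Int :=
  if PySem.Int.mod cardinal 2 = 0 then [(cardinal - 1) * line_length, 0]
  else [0, (cardinal - 2) * line_length]

def stepA (line_length : Int) (st : List (List Int) × Int × Int × Int) (item : Int) :
    List (List Int) × Int × Int × Int :=
  let cardinal := pyTurn st.2.2.2 item
  let coords := pyGetCoords cardinal line_length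
  -- coords[0] / coords[1]: coords always has length 2, so the indexing never raises
  let x := st.2.1 + (PySem.List.pyGet? coords 0).getD 0
  let y := st.2.2.1 + (PySem.List.pyGet? coords 1).getD 0
  (st.1 ++ [[x, y]], x, y, cardinal)

def generate_plot_points (x_initial : Int) (y_initial : Int) (turns_list : List Int) (line_length : Int) : List (List Int) :=
  (turns_list.foldl (stepA line_length) ([[x_initial, y_initial]], x_initial, y_initial, 0)).1

-- ===== PORT B =====
-- state: (points so far, running turn total, histogram heading -> steps taken with it)
def stepB (x_initial y_initial line_length : Int)
    (st : List (List Int) × Int × PySem.Dict Int Int) (t : Int) :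
    List (List Int) × Int × PySem.Dict Int Int :=
  let total := st.2.1 + t
  let h := PySem.Int.mod total 4
  let counts := st.2.2.modify h 0 (· + 1)      -- counts[h] = counts.get(h, 0) + 1
  (st.1 ++ [[x_initial + line_length * (counts.getD 2 0 - counts.getD 0 0),
             y_initial + line_length * (counts.getD 3 0 - counts.getD 1 0)]],
   total, counts)

def generate_plot_points_alt (x_initial : Int) (y_initial : Int) (turns_list : List Int) (line_length : Int) : List (List Int) :=
  (turns_list.foldl (stepB x_initial y_initial line_length)
      ([[x_initial, y_initial]], 0, PySem.Dict.empty)).1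

-- ===== PRECONDITION & SPEC =====
def Spec_generate_plot_points (x_initial : Int) (y_initial : Int) (turns_list : List Int) (line_length : Int) (out : List (List Int)) : Prop := out = generate_plot_points_alt x_initial y_initial turns_list line_length
instance (x_initial : Int) (y_initial : Int) (turns_list : List Int) (line_length : Int) (out : List (List Int)) : Decidable (Spec_generate_plot_points x_initial y_initial turns_list line_length out) := by unfold Spec_generate_plot_points; infer_instance

-- ===== CLAIM =====
def Claim_equal_generate_plot_points : Prop := ∀ (x_initial : Int) (y_initial : Int) (turns_list : List Int) (line_length : Int), Dom_generate_plot_points x_initial y_initial turns_list line_length → Spec_generate_plot_points x_initial y_initial turns_list line_length (generate_plot_points x_initial y_initial turns_list line_length)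

-- ===== LEMMAS AND PROOFS =====

lemma mod4_absorb (s t : Int) :
    PySem.Int.mod (PySem.Int.mod s 4 + 4 + t) 4 = PySem.Int.mod (s + t) 4 := by
  have h4 : (0:Int) < 4 := by norm_num
  simp only [PySem.Int.mod_eq_emod_of_pos h4]
  omega

lemma mod4_bounds (s : Int) : 0 ≤ PySem.Int.mod s 4 ∧ PySem.Int.mod s 4 < 4 := by
  rw [PySem.Int.mod_eq_emod_of_pos (by norm_num : (0:Int) < 4)]
  omega

-- one A-step from the reconstructed position equals reconstruction from the bumped histogram
lemma coord_step (x0 y0 L total t : Int) (d : PySem.Dict Int Int) :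
    (x0 + L * (d.getD 2 0 - d.getD 0 0)
       + (PySem.List.pyGet? (pyGetCoords (PySem.Int.mod (total + t) 4) L) 0).getD 0,
     y0 + L * (d.getD 3 0 - d.getD 1 0)
       + (PySem.List.pyGet? (pyGetCoords (PySem.Int.mod (total + t) 4) L) 1).getD 0) =
    (x0 + L * ((d.modify (PySem.Int.mod (total + t) 4) 0 (· + 1)).getD 2 0
             - (d.modify (PySem.Int.mod (total + t) 4) 0 (· + 1)).getD 0 0),
     y0 + L * ((d.modify (PySem.Int.mod (total + t) 4) 0 (· + 1)).getD 3 0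
             - (d.modify (PySem.Int.mod (total + t) 4) 0 (· + 1)).getD 1 0)) := by
  obtain ⟨hlo, hhi⟩ := mod4_bounds (total + t)
  have : PySem.Int.mod (total + t) 4 = 0 ∨ PySem.Int.mod (total + t) 4 = 1 ∨
      PySem.Int.mod (total + t) 4 = 2 ∨ PySem.Int.mod (total + t) 4 = 3 := by omega
  rcases this with h | h | h | h <;> rw [h] <;>
    simp only [PySem.Dict.getD_modify] <;>
    norm_num [pyGetCoords, PySem.Int.mod, PySem.List.pyGet?, PySem.List.pyIdx?,
      (by decide : Int.fmod 1 2 = 1), (by decide : Int.fmod 3 2 = 1),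
      (by decide : Int.toNat 2 = 2), (by decide : Int.toNat 3 = 3)] <;>
    ring

lemma main_loop (x0 y0 L : Int) (l : List Int) (pts : List (List Int)) (total : Int)
    (d : PySem.Dict Int Int) :
    (l.foldl (stepA L) (pts,
        x0 + L * (d.getD 2 0 - d.getD 0 0),
        y0 + L * (d.getD 3 0 - d.getD 1 0),
        PySem.Int.mod total 4)).1 =
    (l.foldl (stepB x0 y0 L) (pts, total, d)).1 := by
  induction l generalizing pts total d with
  | nil => simp
  | cons t l ih =>
      have hcard : pyTurn (PySem.Int.mod total 4) t = PySem.Int.mod (total + t) 4 := by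
        simpa [pyTurn] using mod4_absorb total t
      have hc := coord_step x0 y0 L total t d
      simp only [List.foldl_cons, stepA, stepB, hcard]
      simp only [Prod.mk.injEq] at hc
      obtain ⟨hx, hy⟩ := hc
      rw [hx, hy]
      exact ih _ (total + t) _

-- ===== VERDICT =====
theorem generate_plot_points_spec : Claim_equal_generate_plot_points := by
  intro x y l L _
  show generate_plot_points x y l L = generate_plot_points_alt x y l L
  unfold generate_plot_points generate_plot_points_alt
  have e : ∀ k : Int, (PySem.Dict.empty : PySem.Dict Int Int).getD k 0 = 0 := fun _ => rfl
  have h := main_loop x y L l [[x, y]] 0 PySem.Dict.empty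
  simp only [e, (by decide : PySem.Int.mod 0 4 = 0)] at h
  norm_num at h
  exact h
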